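-- pv_equiv track=rewrite | github.com/Collaborative-AI/RayFL | src/make.py | make_controls
-- ===== SOURCE A (Python) =====
-- import itertools
--
-- def make_controls(script_name, init_seeds, num_experiments, resume_mode, control_name):
--     control_names = []
--     for i in range(len(control_name)):
--         control_names.extend(list('_'.join(x) for x in itertools.product(*control_name[i])))
--     control_names = [control_names]
--     controls = script_name + init_seeds + num_experiments + resume_mode + control_names
--     controls = list(itertools.product(*controls))
--     return controls
-- ===== SOURCE B (Python) =====
-- def make_controls(script_name, init_seeds, num_experiments, resume_mode, control_name):
--     def product_by_index(lists):
--         total = 1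
--         for l in lists:
--             total *= len(l)
--         out = []
--         for k in range(total):
--             rem = k
--             t = []
--             for l in reversed(lists):
--                 rem, j = divmod(rem, len(l))
--                 t.append(l[j])
--             t.reverse()
--             out.append(tuple(t))
--         return out
--
--     names = []
--     for group in control_name:
--         names.extend('_'.join(t) for t in product_by_index(group))
--     lists = script_name + init_seeds + num_experiments + resume_mode + [names]
--     return product_by_index(lists)
-- ===== Notes on version B (the rewrite author's own statement) =====
-- stated objective: alternative
-- what changed: B replaces itertools.product entirely by mixed-radix rank decoding: it computes the total count as the product of the list lengths and, for each rank k in range(total), decodes the digit indices by repeated divmod over the reversed lists and looks the elements up by index, yielding the same odometer order.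
import Mathlib
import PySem

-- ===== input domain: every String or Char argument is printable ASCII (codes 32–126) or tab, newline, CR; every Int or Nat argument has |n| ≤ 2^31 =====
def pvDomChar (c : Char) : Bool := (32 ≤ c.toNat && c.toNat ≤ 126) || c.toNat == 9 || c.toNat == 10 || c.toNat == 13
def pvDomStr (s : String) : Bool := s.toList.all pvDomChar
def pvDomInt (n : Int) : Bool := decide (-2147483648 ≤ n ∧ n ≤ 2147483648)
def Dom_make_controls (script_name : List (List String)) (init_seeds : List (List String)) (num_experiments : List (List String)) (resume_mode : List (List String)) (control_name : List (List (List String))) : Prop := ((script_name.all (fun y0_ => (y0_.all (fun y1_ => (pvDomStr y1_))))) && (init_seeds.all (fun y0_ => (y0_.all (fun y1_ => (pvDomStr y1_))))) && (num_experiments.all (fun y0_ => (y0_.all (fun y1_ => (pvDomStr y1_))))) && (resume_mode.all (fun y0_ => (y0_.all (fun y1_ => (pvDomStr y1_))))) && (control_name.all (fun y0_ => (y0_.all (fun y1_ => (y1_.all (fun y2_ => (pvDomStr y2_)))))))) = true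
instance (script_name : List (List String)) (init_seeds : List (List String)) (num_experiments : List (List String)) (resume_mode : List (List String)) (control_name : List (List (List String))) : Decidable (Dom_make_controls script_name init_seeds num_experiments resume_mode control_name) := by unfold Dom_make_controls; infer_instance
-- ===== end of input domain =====

-- B enumerates each Cartesian product by mixed-radix index decoding (count the total,
-- then decode each rank k into digit indices by divmod) instead of nested iteration;
-- alternative algorithm, no speed claim.

-- ===== PORT A =====
-- itertools.product(*ls) as A uses it: head-first recursion (first list varies slowest)
def pvProduct (ls : List (List String)) : List (List String) :=
  match ls with
  | [] => [[]]
  | l :: rest => l.flatMap (fun x => (pvProduct rest).map (fun t => x :: t))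

def make_controls (script_name : List (List String)) (init_seeds : List (List String)) (num_experiments : List (List String)) (resume_mode : List (List String)) (control_name : List (List (List String))) : List (List String) :=
  -- for i in range(len(control_name)): control_names.extend('_'.join(x) for x in product(*control_name[i]))
  let control_names :=
    (PySem.List.pyRange 0 control_name.length 1).foldl
      (fun acc i =>
        acc ++ (pvProduct (PySem.List.pyGetD control_name i [])).map
          (fun x => PySem.Str.join "_" x)) []
  let controls := script_name ++ init_seeds ++ num_experiments ++ resume_mode ++ [control_names]
  pvProduct controls

-- ===== PORT B =====
-- total = 1; for l in lists: total *= len(l)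
def pvTotal (ls : List (List String)) : Nat :=
  ls.foldl (fun a l => a * l.length) 1

-- one step of the inner loop over reversed(lists): rem, j = divmod(rem, len(l)); t.append(l[j])
def pvStep (st : Nat × List String) (l : List String) : Nat × List String :=
  (st.1 / l.length, st.2 ++ [l.getD (st.1 % l.length) ""])

-- decode rank k: rem = k; t = []; for l in reversed(lists): …; t.reverse()
def pvDecode (ls : List (List String)) (k : Nat) : List String :=
  (ls.reverse.foldl pvStep (k, [])).2.reverse

-- out = [decode(k) for k in range(total)]
def pvProductIdx (ls : List (List String)) : List (List String) :=
  (List.range (pvTotal ls)).map (pvDecode ls)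

def make_controls_alt (script_name : List (List String)) (init_seeds : List (List String)) (num_experiments : List (List String)) (resume_mode : List (List String)) (control_name : List (List (List String))) : List (List String) :=
  let names :=
    control_name.foldl
      (fun acc group => acc ++ (pvProductIdx group).map (fun t => PySem.Str.join "_" t)) []
  pvProductIdx (script_name ++ init_seeds ++ num_experiments ++ resume_mode ++ [names])

-- ===== PRECONDITION & SPEC =====
def Spec_make_controls (script_name : List (List String)) (init_seeds : List (List String)) (num_experiments : List (List String)) (resume_mode : List (List String)) (control_name : List (List (List String))) (out : List (List String)) : Prop := out = make_controls_alt script_name init_seeds num_experiments resume_mode control_name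
instance (script_name : List (List String)) (init_seeds : List (List String)) (num_experiments : List (List String)) (resume_mode : List (List String)) (control_name : List (List (List String))) (out : List (List String)) : Decidable (Spec_make_controls script_name init_seeds num_experiments resume_mode control_name out) := by unfold Spec_make_controls; infer_instance

-- ===== CLAIM (what is proved, stated in full; the proofs are below) =====
def Claim_equal_make_controls : Prop := ∀ (script_name : List (List String)) (init_seeds : List (List String)) (num_experiments : List (List String)) (resume_mode : List (List String)) (control_name : List (List (List String))), Dom_make_controls script_name init_seeds num_experiments resume_mode control_name → Spec_make_controls script_name init_seeds num_experiments resume_mode control_name (make_controls script_name init_seeds num_experiments resume_mode control_name)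

-- ===== LEMMAS AND PROOFS =====

theorem pvTotal_eq (ls : List (List String)) : pvTotal ls = (ls.map List.length).prod := by
  suffices h : ∀ a, ls.foldl (fun a l => a * l.length) a = a * (ls.map List.length).prod by
    simpa [pvTotal] using h 1
  induction ls with
  | nil => simp
  | cons l rest ih => intro a; simp [ih, mul_assoc]

theorem pvTotal_cons (l : List String) (rest : List (List String)) :
    pvTotal (l :: rest) = l.length * pvTotal rest := by
  simp [pvTotal_eq]

-- the reversed fold peels the head list LAST
theorem decodeState_cons (l : List String) (rest : List (List String)) (k : Nat) :
    (l :: rest).reverse.foldl pvStep (k, []) = pvStep (rest.reverse.foldl pvStep (k, [])) l := by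
  simp [List.reverse_cons]

-- the remainder after decoding ls is the quotient by the full total
theorem decodeState_fst (ls : List (List String)) (k : Nat) :
    (ls.reverse.foldl pvStep (k, [])).1 = k / pvTotal ls := by
  induction ls generalizing k with
  | nil => simp [pvTotal]
  | cons l rest ih =>
    rw [decodeState_cons, pvTotal_cons]
    simp only [pvStep, ih, Nat.div_div_eq_div_mul]
    rw [Nat.mul_comm]

-- the digits decoded from i * total + k' are the digits of k'
theorem decodeState_snd_mod (ls : List (List String)) (i k' : Nat) :
    ((ls.reverse.foldl pvStep (i * pvTotal ls + k', [])).2)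
      = (ls.reverse.foldl pvStep (k', [])).2 := by
  induction ls generalizing i with
  | nil => simp
  | cons l rest ih =>
    rw [decodeState_cons, decodeState_cons]
    simp only [pvStep]
    have hk : i * pvTotal (l :: rest) + k' = (i * l.length) * pvTotal rest + k' := by
      rw [pvTotal_cons]; ring
    rw [hk, ih (i * l.length)]
    congr 2
    rw [decodeState_fst, decodeState_fst]
    rcases Nat.eq_zero_or_pos (pvTotal rest) with hT | hT
    · simp [hT]
    · rw [Nat.add_comm, Nat.add_mul_div_right _ _ hT, Nat.add_mul_mod_self_right]

-- List.range (a*b) as blocks of size b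
theorem range_mul_eq (a b : Nat) :
    List.range (a * b) = (List.range a).flatMap (fun i => (List.range b).map (fun j => i * b + j)) := by
  induction a with
  | zero => simp
  | succ a ih =>
    rw [Nat.succ_mul, List.range_add, ih, List.range_succ, List.flatMap_append]
    simp [Nat.mul_comm]

-- flatMap over a list, expressed by indexing
theorem flatMap_range_getD (l : List String) (g : String → List (List String)) :
    (List.range l.length).flatMap (fun i => g (l.getD i "")) = l.flatMap g := by
  induction l with
  | nil => simp
  | cons x l ih =>
    rw [List.length_cons, List.range_succ_eq_map, List.flatMap_cons, List.flatMap_map]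
    simp only [List.getD_cons_zero, List.getD_cons_succ]
    rw [ih]; rfl

-- main bridge: index decoding enumerates exactly A's head-first product
theorem productIdx_eq (ls : List (List String)) : pvProductIdx ls = pvProduct ls := by
  induction ls with
  | nil => rfl
  | cons l rest ih =>
    unfold pvProductIdx
    rw [pvTotal_cons, range_mul_eq, List.map_flatMap]
    have hblock : ∀ i ∈ List.range l.length,
        ((List.range (pvTotal rest)).map (fun j => i * pvTotal rest + j)).map (pvDecode (l :: rest))
          = (pvProduct rest).map (fun u => l.getD i "" :: u) := by
      intro i hi
      rw [List.mem_range] at hi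
      rw [List.map_map, ← ih]
      unfold pvProductIdx
      rw [List.map_map]
      apply List.map_congr_left
      intro k' hk'
      rw [List.mem_range] at hk'
      simp only [Function.comp]
      unfold pvDecode
      rw [decodeState_cons]
      simp only [pvStep, List.reverse_append, List.reverse_singleton, List.cons_append,
        List.nil_append, decodeState_snd_mod, decodeState_fst]
      have hq : (i * pvTotal rest + k') / pvTotal rest = i := by
        rcases Nat.eq_zero_or_pos (pvTotal rest) with hT | hT
        · omega
        · rw [Nat.add_comm, Nat.add_mul_div_right _ _ hT, Nat.div_eq_of_lt hk']; omega
      rw [hq, Nat.mod_eq_of_lt hi]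
    rw [List.flatMap_congr hblock]
    show (List.range l.length).flatMap (fun i => (fun x => (pvProduct rest).map (fun u => x :: u)) (l.getD i "")) = _
    rw [flatMap_range_getD l (fun x => (pvProduct rest).map (fun u => x :: u))]
    rfl

-- ===== VERDICT (by name: the statement is the Claim_ definition above) =====
theorem make_controls_spec : Claim_equal_make_controls := by
  intro script_name init_seeds num_experiments resume_mode control_name _
  unfold Spec_make_controls make_controls make_controls_alt
  rw [PySem.List.foldl_pyRange_zero_pyGetD' control_name []
    (fun acc g => acc ++ (pvProduct g).map (fun x => PySem.Str.join "_" x)) []]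
  simp only [productIdx_eq]
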